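-- pv_equiv track=rewrite | github.com/VItaly0117/book-translator | clean_markdown.py | balance_latex_blocks
-- ===== SOURCE A (Python) =====
-- def balance_latex_blocks(text):
--
--     lines = text.split("\n")
--     fixed = []
--     open_block = False
--
--     for line in lines:
--
--         if "$$" in line:
--
--             count = line.count("$$")
--
--             if count % 2 == 1:
--                 open_block = not open_block
--
--         fixed.append(line)
--
--     if open_block:
--         fixed.append("$$")
--
--     return "\n".join(fixed)
-- ===== SOURCE B (Python) =====
-- def balance_latex_blocks(text):
--     # Parity of the global number of non-overlapping "$$" markers decides
--     # whether a block is left open; no per-line state needed.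
--     if text.count("$$") % 2 == 1:
--         return text + "\n$$"
--     return text
-- ===== Notes on version B (the rewrite author's own statement) =====
-- stated objective: simpler
-- what changed: B removes the line-splitting pass, the accumulator list and the per-line toggled flag: it counts '$$' once over the whole text and appends '\n$$' exactly when that count is odd, rebuilding nothing.
import Mathlib
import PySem

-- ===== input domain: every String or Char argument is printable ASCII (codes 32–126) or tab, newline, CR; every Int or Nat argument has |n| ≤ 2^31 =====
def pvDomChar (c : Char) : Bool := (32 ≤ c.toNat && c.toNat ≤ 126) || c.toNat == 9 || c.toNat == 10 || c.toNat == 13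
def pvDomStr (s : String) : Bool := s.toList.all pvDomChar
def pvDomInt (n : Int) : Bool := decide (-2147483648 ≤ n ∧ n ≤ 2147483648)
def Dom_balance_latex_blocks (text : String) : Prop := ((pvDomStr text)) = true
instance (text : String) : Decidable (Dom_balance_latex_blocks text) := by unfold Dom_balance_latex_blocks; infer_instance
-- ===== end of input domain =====

-- B replaces A's per-line pass (split, toggled flag, accumulator list, re-join) by one global
-- count of "$$" and a closed-form append; objective: simpler.

-- ===== PORT A =====
-- literal transliteration of A: split into lines, walk them with a toggled open_block flag
-- while copying each line into `fixed`, append "$$" if a block stays open, re-join.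
def balance_latex_blocks (text : String) : String :=
  let lines := (PySem.Str.split? text "\n").getD []
  let st := lines.foldl (fun (st : List String × Bool) line =>
      let ob :=
        if PySem.Str.isIn "$$" line then
          (if PySem.Str.count line "$$" % 2 == 1 then !st.2 else st.2)
        else st.2
      (st.1 ++ [line], ob)) ([], false)
  let fixed := if st.2 then st.1 ++ ["$$"] else st.1
  PySem.Str.join "\n" fixed

-- ===== PORT B =====
-- literal transliteration of B: text + "\n$$" iff the global count of "$$" is odd.
def balance_latex_blocks_alt (text : String) : String :=
  if PySem.Str.count text "$$" % 2 == 1 then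
    String.ofList (text.toList ++ ['\n', '$', '$'])
  else text

-- ===== PRECONDITION & SPEC =====
def Spec_balance_latex_blocks (text : String) (out : String) : Prop := out = balance_latex_blocks_alt text
instance (text : String) (out : String) : Decidable (Spec_balance_latex_blocks text out) := by unfold Spec_balance_latex_blocks; infer_instance

-- ===== CLAIM (what is proved, stated in full; the proofs are below) =====
def Claim_equal_balance_latex_blocks : Prop := ∀ (text : String), Dom_balance_latex_blocks text → Spec_balance_latex_blocks text (balance_latex_blocks text)

-- ===== LEMMAS AND PROOFS =====

-- clean structural version of Python's non-overlapping count of "$$"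
def cnt : List Char → Nat
  | [] => 0
  | [_] => 0
  | c :: d :: r => if c = '$' ∧ d = '$' then cnt r + 1 else cnt (d :: r)

theorem countgo_eq_cnt : ∀ (fuel : Nat) (l : List Char) (acc : Nat), l.length ≤ fuel →
    PySem.Chars.count.go ['$', '$'] fuel l acc = acc + cnt l := by
  intro fuel
  induction fuel with
  | zero =>
    intro l acc h
    have : l = [] := List.eq_nil_of_length_eq_zero (Nat.le_zero.mp h)
    subst this; simp [PySem.Chars.count.go, cnt]
  | succ f ih =>
    intro l acc h
    match l with
    | [] => simp [PySem.Chars.count.go, cnt]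
    | c :: t =>
      rw [PySem.Chars.count.go]
      by_cases hp : List.isPrefixOf ['$', '$'] (c :: t) = true
      · simp only [hp, if_true]
        obtain ⟨r, hr⟩ := (List.isPrefixOf_iff_prefix.mp hp)
        rw [← hr]
        have hlen : r.length ≤ f := by
          have := congrArg List.length hr
          simp at this h; omega
        rw [List.drop_left' (by rfl), ih r (acc + 1) hlen]
        simp [cnt]; omega
      · simp only [hp, Bool.false_eq_true, if_false]
        have hlen : t.length ≤ f := by simp at h; omega
        rw [ih t acc hlen]
        -- cnt (c :: t) = cnt t since "$$" is not a prefix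
        have : cnt (c :: t) = cnt t := by
          match t with
          | [] => simp [cnt]
          | d :: r =>
            have : ¬ (c = '$' ∧ d = '$') := by
              intro ⟨h1, h2⟩; subst h1; subst h2
              simp [List.isPrefixOf] at hp
            simp [cnt, this]
        simp [this]

theorem count_eq_cnt (s : String) : PySem.Str.count s "$$" = cnt s.toList := by
  show PySem.Chars.count s.toList "$$".toList = cnt s.toList
  have : "$$".toList = ['$', '$'] := rfl
  rw [this, PySem.Chars.count]
  rw [if_neg (by simp)]
  rw [countgo_eq_cnt _ _ _ (le_refl _)]
  simp

-- characterize PySem's splitOn on a single-char separator by Mathlib's List.splitOn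
theorem splitgo_eq : ∀ (fuel : Nat) (l cur : List Char) (acc : List (List Char)), l.length ≤ fuel →
    PySem.Chars.splitOn.go ['\n'] fuel l cur acc
      = acc.reverse ++ (List.splitOn '\n' l).modifyHead (cur.reverse ++ ·) := by
  intro fuel
  induction fuel with
  | zero =>
    intro l cur acc h
    have : l = [] := List.eq_nil_of_length_eq_zero (Nat.le_zero.mp h)
    subst this
    simp [PySem.Chars.splitOn.go, List.splitOn_nil]
  | succ f ih =>
    intro l cur acc h
    match l with
    | [] => simp [PySem.Chars.splitOn.go, List.splitOn_nil]
    | c :: t =>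
      rw [PySem.Chars.splitOn.go]
      have hlen : t.length ≤ f := by simp at h; omega
      by_cases hc : c = '\n'
      · subst hc
        have hp : List.isPrefixOf ['\n'] ('\n' :: t) = true := by
          simp [List.isPrefixOf]
        simp only [hp, if_true]
        rw [show List.drop (List.length ['\n']) ('\n' :: t) = t from rfl]
        rw [ih t [] (cur.reverse :: acc) hlen]
        have hsp : List.splitOn '\n' ('\n' :: t) = [] :: List.splitOn '\n' t := by
          simp [List.splitOn, List.splitOnP_cons]
        rw [hsp]
        obtain ⟨h0, T, hT⟩ := List.exists_cons_of_ne_nil (List.splitOnP_ne_nil _ t)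
        simp [List.splitOn] at hT ⊢
        rw [hT]
        simp
      · have hp : List.isPrefixOf ['\n'] (c :: t) = false := by
          simp [List.isPrefixOf]; intro h'; exact hc h'.symm
        simp only [hp, Bool.false_eq_true, if_false]
        rw [ih t (c :: cur) acc hlen]
        have hsp : List.splitOn '\n' (c :: t) = (List.splitOn '\n' t).modifyHead (c :: ·) := by
          simp [List.splitOn, List.splitOnP_cons, hc]
        rw [hsp]
        obtain ⟨h0, T, hT⟩ := List.exists_cons_of_ne_nil (List.splitOnP_ne_nil _ t)
        simp [List.splitOn] at hT ⊢
        rw [hT]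
        simp

theorem splitOn_char (l : List Char) :
    PySem.Chars.splitOn l ['\n'] = List.splitOn '\n' l := by
  rw [PySem.Chars.splitOn, splitgo_eq (l.length + 1) l [] [] (by omega)]
  obtain ⟨h0, T, hT⟩ := List.exists_cons_of_ne_nil (List.splitOnP_ne_nil (· == '\n') l)
  simp [List.splitOn] at hT ⊢
  rw [hT]
  simp

-- the head of splitOn is the takeWhile prefix
theorem splitOn_head (t : List Char) :
    (List.splitOn '\n' t).head? = some (t.takeWhile (fun x => x ≠ '\n')) := by
  induction t with
  | nil => simp [List.splitOn_nil]
  | cons d t' ih =>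
    by_cases hd : d = '\n'
    · subst hd
      simp [List.splitOn, List.splitOnP_cons]
    · have hsp : List.splitOn '\n' (d :: t') = (List.splitOn '\n' t').modifyHead (d :: ·) := by
        simp [List.splitOn, List.splitOnP_cons, hd]
      obtain ⟨h0, T, hT⟩ := List.exists_cons_of_ne_nil (List.splitOnP_ne_nil (· == '\n') t')
      have hT' : List.splitOn '\n' t' = h0 :: T := hT
      rw [hsp, hT']
      rw [hT'] at ih
      simp only [List.head?_cons, Option.some.injEq] at ih
      simp [List.takeWhile, hd, ih]

-- cnt interacts with prepending a char and its first line the same way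
theorem cnt_cons_takeWhile : ∀ (t : List Char) (c : Char),
    cnt (c :: t) + cnt (t.takeWhile (fun x => x ≠ '\n'))
      = cnt (c :: t.takeWhile (fun x => x ≠ '\n')) + cnt t := by
  intro t
  induction t with
  | nil => intro c; simp [cnt]
  | cons d t' ih =>
    intro c
    by_cases hd : d = '\n'
    · subst hd
      have h1 : cnt (c :: '\n' :: t') = cnt ('\n' :: t') := by
        have : ¬ (c = '$' ∧ '\n' = '$') := by rintro ⟨_, h⟩; exact absurd h (by decide)
        simp [cnt, this]
      simp only [List.takeWhile]
      norm_num
      simp [h1, cnt]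
    · simp only [List.takeWhile, hd, decide_true, ne_eq, decide_not, Bool.not_eq_eq_eq_not,
        Bool.not_true, decide_eq_false_iff_not, if_pos]
      by_cases hcd : c = '$' ∧ d = '$'
      · obtain ⟨hc, hd'⟩ := hcd; subst hc; subst hd'
        have g1 : cnt ('$' :: '$' :: t') = cnt t' + 1 := by simp [cnt]
        have g2 : cnt ('$' :: '$' :: t'.takeWhile (fun x => x ≠ '\n')) =
            cnt (t'.takeWhile (fun x => x ≠ '\n')) + 1 := by simp [cnt]
        have := ih '$'
        simp [List.takeWhile, hd] at *
        omega
      · have g1 : cnt (c :: d :: t') = cnt (d :: t') := by simp [cnt, hcd]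
        have g2 : cnt (c :: d :: t'.takeWhile (fun x => x ≠ '\n')) =
            cnt (d :: t'.takeWhile (fun x => x ≠ '\n')) := by simp [cnt, hcd]
        have := ih d
        simp [List.takeWhile, hd] at *
        omega

-- total "$$" count is the sum of the per-line counts
theorem sum_cnt_splitOn (l : List Char) :
    ((List.splitOn '\n' l).map cnt).sum = cnt l := by
  induction l with
  | nil => simp [List.splitOn_nil, cnt]
  | cons c t ih =>
    by_cases hc : c = '\n'
    · subst hc
      have hsp : List.splitOn '\n' ('\n' :: t) = [] :: List.splitOn '\n' t := by
        simp [List.splitOn, List.splitOnP_cons]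
      have h1 : cnt ('\n' :: t) = cnt t := by
        match t with
        | [] => simp [cnt]
        | d :: r =>
          have : ¬ ('\n' = '$' ∧ d = '$') := by rintro ⟨h, _⟩; exact absurd h (by decide)
          simp [cnt, this]
      simp [hsp, cnt, h1, ih]
    · have hsp : List.splitOn '\n' (c :: t) = (List.splitOn '\n' t).modifyHead (c :: ·) := by
        simp [List.splitOn, List.splitOnP_cons, hc]
      obtain ⟨h0, T, hT⟩ := List.exists_cons_of_ne_nil (List.splitOnP_ne_nil (· == '\n') t)
      have hT' : List.splitOn '\n' t = h0 :: T := hT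
      have hhead : h0 = t.takeWhile (fun x => x ≠ '\n') := by
        have := splitOn_head t
        rw [hT'] at this
        simpa using this
      rw [hsp, hT']
      simp only [List.modifyHead, List.map_cons, List.sum_cons]
      rw [hT'] at ih
      simp only [List.map_cons, List.sum_cons] at ih
      have := cnt_cons_takeWhile t c
      rw [← hhead] at this
      omega

-- a positive cnt means "$$" occurs as an infix
theorem cnt_pos_infix : ∀ (l : List Char), 0 < cnt l → ['$', '$'] <:+: l := by
  intro l
  match l with
  | [] => intro h; simp [cnt] at h
  | [c] => intro h; simp [cnt] at h
  | c :: d :: r =>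
    intro h
    by_cases hcd : c = '$' ∧ d = '$'
    · obtain ⟨h1, h2⟩ := hcd; subst h1; subst h2
      exact ⟨[], r, rfl⟩
    · have : cnt (c :: d :: r) = cnt (d :: r) := by simp [cnt, hcd]
      rw [this] at h
      exact (cnt_pos_infix (d :: r) h).trans (List.infix_cons (List.infix_refl _))

-- one step of A's loop body is an xor with the line's count parity
theorem step_eq_xor (b : Bool) (line : String) :
    (if PySem.Str.isIn "$$" line then
        (if PySem.Str.count line "$$" % 2 == 1 then !b else b)
      else b) = xor b (decide (cnt line.toList % 2 = 1)) := by
  by_cases hin : PySem.Str.isIn "$$" line = true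
  · rw [if_pos hin, count_eq_cnt]
    by_cases hp : cnt line.toList % 2 = 1
    · simp [hp]
    · simp [hp, Nat.mod_two_ne_one.mp hp]
  · rw [if_neg hin]
    have h0 : cnt line.toList = 0 := by
      by_contra hz
      have : ['$', '$'] <:+: line.toList := cnt_pos_infix _ (Nat.pos_of_ne_zero hz)
      have : PySem.Str.isIn "$$" line = true := by
        rw [PySem.Str.isIn_iff_infix]; exact this
      exact hin this
    simp [h0]

-- A's fold: fixed accumulates all lines; the flag is the parity of the total count
theorem fold_char (lines : List String) : ∀ (p : List String) (b : Bool),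
    lines.foldl (fun (st : List String × Bool) line =>
      let ob :=
        if PySem.Str.isIn "$$" line then
          (if PySem.Str.count line "$$" % 2 == 1 then !st.2 else st.2)
        else st.2
      (st.1 ++ [line], ob)) (p, b)
    = (p ++ lines, xor b (decide (((lines.map (fun s => cnt s.toList)).sum) % 2 = 1))) := by
  induction lines with
  | nil => intro p b; simp
  | cons s L ih =>
    intro p b
    simp only [List.foldl_cons]
    rw [step_eq_xor]
    rw [ih]
    simp only [List.map_cons, List.sum_cons, List.append_assoc, List.singleton_append]
    congr 1
    by_cases h1 : cnt s.toList % 2 = 1 <;>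
      by_cases h2 : (L.map (fun s => cnt s.toList)).sum % 2 = 1
    · have h3 : (cnt s.toList + (L.map (fun s => cnt s.toList)).sum) % 2 = 0 := by omega
      simp [h1, h2, h3]
    · have h3 : (cnt s.toList + (L.map (fun s => cnt s.toList)).sum) % 2 = 1 := by omega
      simp [h1, h3, Nat.mod_two_ne_one.mp h2]
    · have h3 : (cnt s.toList + (L.map (fun s => cnt s.toList)).sum) % 2 = 1 := by omega
      simp [h2, h3, Nat.mod_two_ne_one.mp h1]
    · have h3 : (cnt s.toList + (L.map (fun s => cnt s.toList)).sum) % 2 = 0 := by omega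
      simp [h3, Nat.mod_two_ne_one.mp h1, Nat.mod_two_ne_one.mp h2]

theorem intercalate_cons2 {α : Type} (sep x y : List α) (zs : List (List α)) :
    sep.intercalate (x :: y :: zs) = x ++ sep ++ sep.intercalate (y :: zs) := by
  simp [List.intercalate, List.intersperse]

-- intercalate over an appended last piece
theorem intercalate_append_singleton {α : Type} (sep y : List α) :
    ∀ (P : List (List α)), P ≠ [] →
      sep.intercalate (P ++ [y]) = sep.intercalate P ++ sep ++ y := by
  intro P
  induction P with
  | nil => intro h; exact absurd rfl h
  | cons x P' ih =>
    intro _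
    match P' with
    | [] => simp [List.intercalate, List.intersperse]
    | z :: P'' =>
      have := ih (by simp)
      simp only [List.cons_append] at this ⊢
      rw [intercalate_cons2, this, intercalate_cons2]
      simp [List.append_assoc]

theorem join_lines (text : String) :
    PySem.Str.join "\n" ((List.splitOn '\n' text.toList).map String.ofList) = text := by
  rw [PySem.Str.join, PySem.Chars.join]
  have : (((List.splitOn '\n' text.toList).map String.ofList).map String.toList)
      = List.splitOn '\n' text.toList := by
    rw [List.map_map]; simp only [Function.comp_def, String.toList_ofList, List.map_id']
  rw [this]
  have : "\n".toList = ['\n'] := rfl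
  rw [this, List.intercalate_splitOn]
  simp

theorem join_lines_open (text : String) :
    PySem.Str.join "\n" ((List.splitOn '\n' text.toList).map String.ofList ++ ["$$"]) =
      String.ofList (text.toList ++ ['\n', '$', '$']) := by
  rw [PySem.Str.join, PySem.Chars.join]
  rw [List.map_append]
  have h1 : (((List.splitOn '\n' text.toList).map String.ofList).map String.toList)
      = List.splitOn '\n' text.toList := by
    rw [List.map_map]; simp only [Function.comp_def, String.toList_ofList, List.map_id']
  rw [h1]
  have h2 : (["$$"] : List String).map String.toList = [['$', '$']] := rfl
  rw [h2]
  rw [show ("\n".toList) = ['\n'] from rfl]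
  rw [intercalate_append_singleton ['\n'] ['$', '$'] _ (by
    intro h
    exact (List.splitOnP_ne_nil (· == '\n') text.toList) (by simpa using h))]
  rw [List.intercalate_splitOn]
  simp [List.append_assoc]

theorem split_lines (text : String) :
    (PySem.Str.split? text "\n").getD [] = (List.splitOn '\n' text.toList).map String.ofList := by
  rw [PySem.Str.split?]
  have : PySem.Chars.split? text.toList "\n".toList
      = some (PySem.Chars.splitOn text.toList ['\n']) := by
    rw [PySem.Chars.split?]; rfl
  rw [this]
  simp [splitOn_char]

-- ===== VERDICT (by name: the statement is the Claim_ definition above) =====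
theorem balance_latex_blocks_spec : Claim_equal_balance_latex_blocks := by
  intro text _
  unfold Spec_balance_latex_blocks balance_latex_blocks balance_latex_blocks_alt
  simp only [split_lines, fold_char]
  simp only [List.nil_append, Bool.false_xor]
  rw [count_eq_cnt]
  have hsum : (((List.splitOn '\n' text.toList).map String.ofList).map (fun s => cnt s.toList)).sum
      = cnt text.toList := by
    rw [List.map_map]
    have : ((fun s => cnt s.toList) ∘ String.ofList) = cnt := by
      funext l; simp
    rw [this, sum_cnt_splitOn]
  rw [hsum]
  by_cases hp : cnt text.toList % 2 = 1
  · simp only [hp, decide_true, if_pos, beq_iff_eq]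
    exact join_lines_open text
  · simp only [Nat.mod_two_ne_one.mp hp, decide_false]
    rw [if_neg (by simp), if_neg (by simp)]
    exact join_lines text
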